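-- pv_equiv track=rewrite | github.com/poncema4/NeetCode-150 | day_21/(___) practice/solution4.py | lookupTable
-- ===== SOURCE A (Python) =====
-- from typing import List
-- from collections import defaultdict
--
-- def lookupTable(lon: List[int]) -> int:
--     """
--     lon: list of numbers
--
--     task: check how many pairs of indices i, j such that i <= j and the sum of them is equal to some power of 2
--     edge: can include self reference indices
--     """
--     counts = defaultdict(int)
--     total = 0
--
--     for element in lon:
--         counts[element] += 1
--         for power in range(21):
--             second_element = (2 ** power) - element
--             total += counts[second_element]
--
--     return total
-- ===== SOURCE B (Python) =====
-- from typing import List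
--
-- def lookupTable(lon: List[int]) -> int:
--     powers = {2 ** p for p in range(21)}
--     total = 0
--     for j in range(len(lon)):
--         for i in range(j + 1):
--             if lon[i] + lon[j] in powers:
--                 total += 1
--     return total
-- ===== Notes on version B (the rewrite author's own statement) =====
-- stated objective: simpler
-- what changed: B drops A's running counter dict probed with 21 complements per element and instead enumerates all index pairs i <= j directly, testing each sum against a precomputed set of the 21 powers of two.
import Mathlib
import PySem

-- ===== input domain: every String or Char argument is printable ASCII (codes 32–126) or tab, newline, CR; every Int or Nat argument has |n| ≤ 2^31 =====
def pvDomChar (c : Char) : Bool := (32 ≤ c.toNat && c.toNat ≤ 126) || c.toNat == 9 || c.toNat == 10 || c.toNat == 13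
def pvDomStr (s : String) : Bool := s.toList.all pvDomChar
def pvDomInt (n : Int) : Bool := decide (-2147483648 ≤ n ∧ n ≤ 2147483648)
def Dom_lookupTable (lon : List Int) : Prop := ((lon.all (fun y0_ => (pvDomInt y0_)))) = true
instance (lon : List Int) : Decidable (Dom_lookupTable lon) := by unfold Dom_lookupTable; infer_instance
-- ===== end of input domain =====

-- B enumerates the index pairs i <= j directly and tests the sum against a precomputed set of
-- powers of two, instead of A's running counter dict probed with 21 complements per element
-- (objective: simpler; not faster).

-- ===== PORT A =====
-- loop body of A's 'for element in lon' (state = (counts, total)); reading the defaultdict is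
-- ported as getD _ 0 (the 0-entries defaultdict inserts on reads never change any later lookup)
def lookupStepA (st : PySem.Dict Int Int × Int) (element : Int) : PySem.Dict Int Int × Int :=
  let counts := st.1.insert element (st.1.getD element 0 + 1)
  let total := (PySem.List.pyRange 0 21).foldl
    (fun t power => t + counts.getD (2 ^ power.toNat - element) 0) st.2
  (counts, total)

def lookupTable (lon : List Int) : Int :=
  (lon.foldl lookupStepA ((PySem.Dict.empty : PySem.Dict Int Int), 0)).2

-- ===== PORT B =====
-- '2 ** p' is 2 ^ p.toNat (p ranges over 0..20, exact)
def lookupTable_alt (lon : List Int) : Int :=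
  let powers : PySem.Set Int :=
    PySem.Set.ofList ((PySem.List.pyRange 0 21).map (fun p => (2 : Int) ^ p.toNat))
  (PySem.List.pyRange 0 (lon.length : Int)).foldl
    (fun total j =>
      (PySem.List.pyRange 0 (j + 1)).foldl
        (fun total2 i =>
          if PySem.Set.contains powers (PySem.List.pyGetD lon i 0 + PySem.List.pyGetD lon j 0)
          then total2 + 1 else total2)
        total)
    0

-- ===== PRECONDITION & SPEC =====
def Spec_lookupTable (lon : List Int) (out : Int) : Prop := out = lookupTable_alt lon
instance (lon : List Int) (out : Int) : Decidable (Spec_lookupTable lon out) := by unfold Spec_lookupTable; infer_instance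

-- ===== CLAIM (what is proved, stated in full; the proofs are below) =====
def Claim_equal_lookupTable : Prop := ∀ (lon : List Int), Dom_lookupTable lon → Spec_lookupTable lon (lookupTable lon)

-- ===== LEMMAS AND PROOFS =====

-- the 21 candidate sums, as a plain list
def pows : List Int := (PySem.List.pyRange 0 21).map (fun p => (2 : Int) ^ p.toNat)

lemma pows_nodup : pows.Nodup := by decide

lemma ofList_pows :
    PySem.Set.ofList ((PySem.List.pyRange 0 21).map (fun p => (2 : Int) ^ p.toNat)) = pows := by
  decide

-- the dict component of A's fold is the plain counter fold
lemma lookupA_fst (l : List Int) (d : PySem.Dict Int Int) (t : Int) :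
    (l.foldl lookupStepA (d, t)).1 = l.foldl (fun d x => d.insert x (d.getD x 0 + 1)) d := by
  induction l generalizing d t with
  | nil => rfl
  | cons y l ih => simpa [lookupStepA] using ih _ _

-- A's total grows, per appended element, by the sum over pows of the counts in the new prefix
lemma lookupA_append (l : List Int) (x : Int) :
    lookupTable (l ++ [x]) =
      lookupTable l + (pows.map (fun P => (((l ++ [x]).count (P - x) : Nat) : Int))).sum := by
  have hc : ∀ v : Int,
      ((l.foldl (fun d x => d.insert x (d.getD x 0 + 1)) (PySem.Dict.empty : PySem.Dict Int Int)).insert x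
        ((l.foldl (fun d x => d.insert x (d.getD x 0 + 1)) (PySem.Dict.empty : PySem.Dict Int Int)).getD x 0 + 1)).getD v 0
        = (((l ++ [x]).count v : Nat) : Int) := by
    intro v
    have h := PySem.Dict.getD_foldl_insert_add_one (l ++ [x]) (PySem.Dict.empty : PySem.Dict Int Int) v
    rw [List.foldl_append] at h
    simpa using h
  simp only [lookupTable, List.foldl_append, List.foldl_cons, List.foldl_nil]
  rw [lookupStepA]
  simp only [lookupA_fst l (PySem.Dict.empty : PySem.Dict Int Int) 0]
  rw [PySem.List.foldl_add]
  congr 1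
  rw [pows, List.map_map]
  refine congrArg List.sum (List.map_congr_left ?_)
  intro p _
  simp only [Function.comp]
  exact hc _

lemma pyGetD_append_left (l : List Int) (x : Int) (i : Int) (h0 : 0 ≤ i) (h1 : i < (l.length : Int)) :
    PySem.List.pyGetD (l ++ [x]) i 0 = PySem.List.pyGetD l i 0 := by
  have h1' : i < ((l ++ [x]).length : Int) := by simp; omega
  rw [PySem.List.pyGetD_eq_getElem _ _ h0 h1', PySem.List.pyGetD_eq_getElem _ _ h0 h1]
  have : i.toNat < l.length := by omega
  rw [List.getElem_append_left this]

lemma pyGetD_append_last (l : List Int) (x : Int) :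
    PySem.List.pyGetD (l ++ [x]) (l.length : Int) 0 = x := by
  have h1 : (l.length : Int) < ((l ++ [x]).length : Int) := by simp
  rw [PySem.List.pyGetD_eq_getElem _ _ (by positivity) h1]
  simp

-- B's total grows, per appended element, by the number of prefix members whose sum with it is a power
lemma lookupB_append (l : List Int) (x : Int) :
    lookupTable_alt (l ++ [x]) =
      lookupTable_alt l + (((l ++ [x]).countP (fun y => pows.contains (y + x)) : Nat) : Int) := by
  simp only [lookupTable_alt]
  rw [ofList_pows]
  have hlen : (((l ++ [x]).length : Nat) : Int) = (l.length : Int) + 1 := by simp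
  rw [hlen, PySem.List.pyRange_one_succ_right (by positivity), List.foldl_append]
  -- the outer fold over the old indices is unchanged by appending x
  have houter :
      (PySem.List.pyRange 0 (l.length : Int)).foldl
        (fun (total : Int) j => (PySem.List.pyRange 0 (j + 1)).foldl
          (fun total2 i =>
            if PySem.Set.contains pows (PySem.List.pyGetD (l ++ [x]) i 0 + PySem.List.pyGetD (l ++ [x]) j 0)
            then total2 + 1 else total2) total) (0 : Int)
      = (PySem.List.pyRange 0 (l.length : Int)).foldl
        (fun (total : Int) j => (PySem.List.pyRange 0 (j + 1)).foldl
          (fun total2 i =>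
            if PySem.Set.contains pows (PySem.List.pyGetD l i 0 + PySem.List.pyGetD l j 0)
            then total2 + 1 else total2) total) (0 : Int) := by
    apply PySem.List.foldl_congr_mem
    intro acc j hj
    rw [PySem.List.mem_pyRange_one] at hj
    apply PySem.List.foldl_congr_mem
    intro acc2 i hi
    rw [PySem.List.mem_pyRange_one] at hi
    rw [pyGetD_append_left l x i hi.1 (by omega), pyGetD_append_left l x j hj.1 hj.2]
  rw [houter]
  -- the new outer step at j = l.length
  simp only [List.foldl_cons, List.foldl_nil]
  rw [pyGetD_append_last]
  rw [PySem.List.foldl_if_add_one (fun i => PySem.Set.contains pows (PySem.List.pyGetD (l ++ [x]) i 0 + x))]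
  congr 1
  have hmap : (PySem.List.pyRange 0 ((l ++ [x]).length : Int)).map (fun j => PySem.List.pyGetD (l ++ [x]) j 0) = l ++ [x] :=
    PySem.List.map_pyGetD_pyRange_zero' (l ++ [x]) 0
  have hcp : ((l ++ [x]).countP (fun y => pows.contains (y + x)))
      = List.countP ((fun y => pows.contains (y + x)) ∘ (fun j => PySem.List.pyGetD (l ++ [x]) j 0))
          (PySem.List.pyRange 0 ((l ++ [x]).length : Int)) := by
    rw [← List.countP_map, hmap]
  rw [hcp, hlen]
  rfl

-- counting by complements over pows equals counting pair partners, for any multiset of values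
lemma sum_count_pows (m : List Int) (x : Int) :
    (pows.map (fun P => ((m.count (P - x) : Nat) : Int))).sum
      = ((m.countP (fun y => pows.contains (y + x)) : Nat) : Int) := by
  induction m with
  | nil => simp
  | cons y t ih =>
    have hfun : (fun P : Int => (((y :: t).count (P - x) : Nat) : Int))
        = fun P => ((t.count (P - x) : Nat) : Int) + (if ((P == y + x) : Bool) then (1 : Int) else 0) := by
      funext P
      rw [List.count_cons]
      by_cases h : P = y + x
      · have hy : (y == P - x) = true := by simp; omega
        have hP : (P == y + x) = true := by simp [h]
        simp [hy, hP]
      · have hy : (y == P - x) = false := by simp; omega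
        have hP : (P == y + x) = false := by simp [h]
        simp [hy, hP]
    rw [hfun, PySem.List.sum_map_add_int, ih,
      PySem.List.sum_map_ite_one_zero (fun P => P == y + x) pows]
    have hcount : (pows.countP (fun P => P == y + x)) = pows.count (y + x) :=
      (List.count_eq_countP).symm
    rw [List.countP_cons, hcount]
    by_cases h : (y + x) ∈ pows
    · rw [List.count_eq_one_of_mem pows_nodup h]
      simp
      omega
    · rw [List.count_eq_zero_of_not_mem h]
      have hb : (pows.contains (y + x)) = false := by
        simpa using h
      simp [h]

lemma lookup_eq (lon : List Int) : lookupTable lon = lookupTable_alt lon := by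
  induction lon using List.reverseRecOn with
  | nil => rfl
  | append_singleton l x ih =>
    rw [lookupA_append, lookupB_append, ih, sum_count_pows]

-- ===== VERDICT (by name: the statement is the Claim_ definition above) =====
theorem lookupTable_spec : Claim_equal_lookupTable := by
  intro lon _
  exact lookup_eq lon
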